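-- pv_equiv track=rewrite | github.com/wheelercj/multimedia-marks-script | main.py | split_baselight_line
-- ===== SOURCE A (Python) =====
-- def split_baselight_line(line: str) -> tuple[str, list[str]]:
--     """Splits a Baselight export file's line into a path and raw frame numbers.
--
--     Assumes the line is either empty or contains a path and raw frame numbers. There may
--     be instances of ``<err>``, ``<null>``, and/or empty strings mixed into the returned
--     frame numbers.
--     """
--     # Regex is not good to use here becauses it's more difficult to read and maintain.
--     # If only I had thought of how to do this without regex earlier.
--     # ^((?:(?:\w:)?[/\\][^/\n]+?)+)((?: (?:\d+|<null>|<err>))+) *$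
--     # Capture group 1 is the path and capture group 2 is the frame numbers, <null>s, and
--     # <err>s. This pattern requires the re.MULTILINE flag.
--     if not line:
--         return "", []
--     line_tokens: list[str] = line.split(" ")
--     i = len(line_tokens)
--     for token in reversed(line_tokens):
--         if not token.isdigit() and token not in ("<err>", "<null>", ""):
--             break
--         i -= 1
--     frame_numbers: list[str] = line_tokens[i:]
--     path: str = " ".join(line_tokens[:i]).replace("\\", "/").strip()
--     return path, frame_numbers
-- ===== SOURCE B (Python) =====
-- def split_baselight_line(line: str) -> tuple[str, list[str]]:
--     """Splits a Baselight export file's line into a path and raw frame numbers."""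
--     if not line:
--         return "", []
--     tokens = line.split(" ")
--     last_non_frame = -1
--     for idx, token in enumerate(tokens):
--         if not (token.isdigit() or token in ("<err>", "<null>", "")):
--             last_non_frame = idx
--     i = last_non_frame + 1
--     path = " ".join(tokens[:i]).replace("\\", "/").strip()
--     return path, tokens[i:]
-- ===== Notes on version B (the rewrite author's own statement) =====
-- stated objective: alternative
-- what changed: Replaces A's reverse scan with a break and a decremented counter by a single forward enumerate pass that records the index of the last non-frame token, from which the split point is computed directly.
import Mathlib
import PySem

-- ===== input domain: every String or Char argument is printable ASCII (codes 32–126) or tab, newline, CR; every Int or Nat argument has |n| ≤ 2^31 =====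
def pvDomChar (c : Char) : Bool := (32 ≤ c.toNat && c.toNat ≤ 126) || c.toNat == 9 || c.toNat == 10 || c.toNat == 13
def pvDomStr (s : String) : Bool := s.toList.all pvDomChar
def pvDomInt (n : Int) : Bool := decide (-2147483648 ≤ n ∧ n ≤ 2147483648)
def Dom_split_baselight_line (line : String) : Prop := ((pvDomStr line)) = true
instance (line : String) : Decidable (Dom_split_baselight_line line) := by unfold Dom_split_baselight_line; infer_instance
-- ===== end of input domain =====

-- B replaces A's reverse scan-with-break by a single forward enumerate pass that
-- records the last non-frame-token index (objective: alternative decomposition, same cost).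


-- ===== PORT A =====
-- A's reversed-with-break loop: decrement i until a non-frame token is met
def pvALoop (toks : List String) (i : Int) : Int :=
  match toks with
  | [] => i
  | t :: rest =>
    if !(PySem.Str.strIsdigit t) && !(t == "<err>" || t == "<null>" || t == "") then i
    else pvALoop rest (i - 1)

def split_baselight_line (line : String) : String × List String :=
  if line == "" then ("", [])
  else
    let line_tokens := (PySem.Str.split? line " ").getD []
    let i := pvALoop line_tokens.reverse (line_tokens.length : Int)
    let frame_numbers := PySem.List.slice line_tokens (some i) none
    let path := PySem.Str.strip
      (PySem.Str.replace (PySem.Str.join " " (PySem.List.slice line_tokens none (some i))) "\\" "/")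
    (path, frame_numbers)

-- ===== PORT B =====
def pvIsFrameToken (t : String) : Bool :=
  PySem.Str.strIsdigit t || t == "<err>" || t == "<null>" || t == ""

def split_baselight_line_alt (line : String) : String × List String :=
  if line == "" then ("", [])
  else
    let tokens := (PySem.Str.split? line " ").getD []
    let last_non_frame := (PySem.List.enumerate tokens 0).foldl
      (fun acc p => if pvIsFrameToken p.2 then acc else p.1) (-1 : Int)
    let i := last_non_frame + 1
    let path := PySem.Str.strip
      (PySem.Str.replace (PySem.Str.join " " (PySem.List.slice tokens none (some i))) "\\" "/")
    (path, PySem.List.slice tokens (some i) none)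

-- ===== PRECONDITION & SPEC =====
def Spec_split_baselight_line (line : String) (out : String × List String) : Prop := out = split_baselight_line_alt line
instance (line : String) (out : String × List String) : Decidable (Spec_split_baselight_line line out) := by unfold Spec_split_baselight_line; infer_instance

-- ===== CLAIM (what is proved, stated in full; the proofs are below) =====
def Claim_equal_split_baselight_line : Prop := ∀ (line : String), Dom_split_baselight_line line → Spec_split_baselight_line line (split_baselight_line line)

-- ===== LEMMAS AND PROOFS =====
lemma pvALoop_eq_fold (ts : List String) :
    pvALoop ts.reverse (ts.length : Int) =
      (PySem.List.enumerate ts 0).foldl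
        (fun acc p => if pvIsFrameToken p.2 then acc else p.1) (-1 : Int) + 1 := by
  induction ts using List.reverseRecOn with
  | nil => simp [pvALoop, PySem.List.enumerate_nil]
  | append_singleton ts' t ih =>
    rw [List.reverse_append, List.reverse_singleton]
    rw [PySem.List.enumerate_append, List.foldl_append]
    simp only [List.singleton_append, List.length_append, List.length_singleton]
    simp only [PySem.List.enumerate_cons, PySem.List.enumerate_nil, List.foldl_cons, List.foldl_nil]
    by_cases hf : pvIsFrameToken t = true
    · have hcond : (!(PySem.Str.strIsdigit t) && !(t == "<err>" || t == "<null>" || t == "")) = false := by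
        unfold pvIsFrameToken at hf
        cases hd : PySem.Str.strIsdigit t <;> simp_all <;> tauto
      simp only [pvALoop, hcond, Bool.false_eq_true, if_false, hf, if_true]
      have : ((ts'.length + 1 : Nat) : Int) - 1 = (ts'.length : Int) := by push_cast; ring
      rw [this, ih]
    · have hcond : (!(PySem.Str.strIsdigit t) && !(t == "<err>" || t == "<null>" || t == "")) = true := by
        unfold pvIsFrameToken at hf
        cases hd : PySem.Str.strIsdigit t <;> simp_all
      simp only [pvALoop, hcond, if_true, Bool.not_eq_true] at *
      simp only [hf]
      push_cast; ring

-- ===== VERDICT (by name: the statement is the Claim_ definition above) =====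
theorem split_baselight_line_spec : Claim_equal_split_baselight_line := by
  intro line _
  unfold Spec_split_baselight_line split_baselight_line split_baselight_line_alt
  by_cases h : line == ""
  · simp [h]
  · simp only [h, Bool.false_eq_true, if_false]
    rw [pvALoop_eq_fold]
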